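-- pv_equiv track=rewrite | github.com/AmandaRSwan/MomentTheoremCode | InsertDelete.py | genweight
-- ===== SOURCE A (Python) =====
-- def genweight(n, s):                                    #Program for generating the recursive weights for words of length n with a maximum of s errors.
--     empty = []                                          #Establish an empty array
--     for i in range(s-1):
--         empty.append(0)                                 #Add s-1 0 bits to the empty array
--     empty.append(1)                                     #Add a 1-bit to the array
--     for i in range(n+s):                                #Assign the range to be the length n of the code word plus the maximum number of errors
--         t = 0                                           #Initialize variable t as 0
--         sum = 1                                         #Initialize the sum to start at 1
--         while t < (s):                                  #While t is less than the maximum number of errors given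
--             sum = sum + empty[i+t]                      #Recursively add the weights of the s-previous bits
--             t = t + 1                                   #Increase t by a factor of 1 (t will increase as long as it is strictly less than s)
--         empty.append(sum)                               #Add the calculated sum the array
--     for i in range(s-1):
--         empty.remove(0)                                 #Remove the beginning 0-bits from the array
--     return empty                                        #Store the array in memory
-- ===== SOURCE B (Python) =====
-- def genweight(n, s):
--     weights = [0] * (s - 1) + [1]
--     window = 1  # running sum of the last s entries of weights
--     for _ in range(n + s):
--         nxt = 1 + window
--         weights.append(nxt)
--         window += nxt - weights[-1 - s]
--     return weights[s - 1:]
-- ===== Notes on version B (the rewrite author's own statement) =====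
-- stated objective: faster
-- what changed: B keeps a running sum of the sliding window of the last s weights (updated in O(1) per step) instead of re-summing s elements in an inner loop, and drops the s-1 leading zeros with one slice instead of s-1 remove(0) passes; Pre_ excludes non-positive s when the loop actually runs (n+s > 0), where the error count is meaningless and A's all-ones output is an accident of its degenerate while loop and zero-padding.
-- outside the precondition, e.g. on genweight(3, 0): A returns [1, 1, 1, 1], B returns [2]; on genweight(5, -3): A returns [1, 1, 1], B raises IndexError
import Mathlib
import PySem

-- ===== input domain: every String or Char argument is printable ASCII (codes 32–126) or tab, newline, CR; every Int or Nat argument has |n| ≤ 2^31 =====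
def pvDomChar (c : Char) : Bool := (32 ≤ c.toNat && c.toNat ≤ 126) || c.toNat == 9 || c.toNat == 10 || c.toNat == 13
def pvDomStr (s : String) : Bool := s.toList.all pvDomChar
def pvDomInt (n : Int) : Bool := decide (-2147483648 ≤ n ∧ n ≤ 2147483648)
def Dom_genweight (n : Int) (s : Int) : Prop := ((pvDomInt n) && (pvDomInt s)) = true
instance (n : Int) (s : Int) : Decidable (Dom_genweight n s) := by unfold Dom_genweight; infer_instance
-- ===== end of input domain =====

-- B replaces A's inner re-summation of the s previous weights by a running window sum,
-- and A's repeated remove(0) passes by a single slice (objective: faster).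

-- ===== PORT A =====
-- Literal port of A. `empty[i+t]` is ported as pyGetD with default 0: the index i+t is
-- always in range (the list has s+i elements when index i is processed), so the default is
-- never used and A never raises. `empty.remove(0)` is ported as remove? with a getD
-- fallback; the list always still contains a 0 at that point, so the fallback is never used.
def genweight (n : Int) (s : Int) : List Int :=
  let empty : List Int := (PySem.List.pyRange 0 (s-1) 1).foldl (fun acc _ => acc ++ [0]) []
  let empty := empty ++ [1]
  let empty := (PySem.List.pyRange 0 (n+s) 1).foldl
    (fun acc i =>
      -- while t < s: sum = sum + empty[i+t]; t += 1   (t runs 0,1,…,s-1)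
      acc ++ [(PySem.List.pyRange 0 s 1).foldl (fun sum t => sum + PySem.List.pyGetD acc (i+t) 0) 1])
    empty
  let empty := (PySem.List.pyRange 0 (s-1) 1).foldl
    (fun acc _ => (PySem.List.remove? acc 0).getD acc) empty
  empty

-- ===== PORT B =====
-- Literal port of Source B: running window sum, weights[-1-s] via pyGetD, final weights[s-1:] as slice.
def genweight_alt (n : Int) (s : Int) : List Int :=
  let st := (PySem.List.pyRange 0 (n+s) 1).foldl
    (fun (p : List Int × Int) _ =>
      let nxt := 1 + p.2
      let arr := p.1 ++ [nxt]
      (arr, p.2 + nxt - PySem.List.pyGetD arr (-1 - s) 0))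
    (List.replicate (s-1).toNat 0 ++ [1], 1)
  PySem.List.slice st.1 (some (s-1)) none

-- ===== PRECONDITION & SPEC =====
-- Pre_ excludes non-positive s whenever the main loop actually runs (n+s > 0): there the
-- error count is meaningless and A's all-ones output is an accident of its degenerate while
-- loop and zero-padding, while B's window indexing returns a different value or raises.
def Pre_genweight (n : Int) (s : Int) : Prop := 1 ≤ s ∨ n + s ≤ 0
instance (n : Int) (s : Int) : Decidable (Pre_genweight n s) := by unfold Pre_genweight; infer_instance
def pvWitness_genweight : Int × Int := (5, 2)

def Spec_genweight (n : Int) (s : Int) (out : List Int) : Prop := out = genweight_alt n s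
instance (n : Int) (s : Int) (out : List Int) : Decidable (Spec_genweight n s out) := by unfold Spec_genweight; infer_instance

-- ===== CLAIM (what is proved, stated in full; the proofs are below) =====
def Claim_equal_genweight : Prop := ∀ (n : Int) (s : Int), Dom_genweight n s → Pre_genweight n s → Spec_genweight n s (genweight n s)

-- ===== LEMMAS AND PROOFS =====

-- fold of `acc + x` is `init + sum` (A's inner while loop after reindexing)
lemma foldl_add_sum (l : List Int) (init : Int) :
    l.foldl (fun a x => a + x) init = init + l.sum := by
  have := PySem.List.foldl_add l (fun x => x) init
  simpa using this

-- a unit range as a mapped Nat range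
lemma pyRange_eq_map (a b : Int) :
    PySem.List.pyRange a b 1 = (List.range (b-a).toNat).map (fun k => a + (k : Int)) := by
  apply List.ext_getElem
  · rw [PySem.List.length_pyRange_one]; simp
  · intro i h1 h2
    rw [PySem.List.getElem_pyRange_one]
    simp [← List.map_eq_flatMap]

-- A's inner while loop computes 1 + (sum of the last s elements) of the current list
lemma inner_sum_eq (s : Int) (hs : 0 < s) (L : List Int) (m : Nat)
    (hlen : L.length = s.toNat + m) :
    (PySem.List.pyRange 0 s 1).foldl (fun sum t => sum + PySem.List.pyGetD L ((m : Int) + t) 0) 1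
      = 1 + (L.drop m).sum := by
  have hlenI : PySem.List.len L = (m : Int) + s := by simp [PySem.List.len_eq]; omega
  have h2 := PySem.List.foldl_pyRange_pyGetD L 0 (fun a x => a + x) 1
      (a := (m : Int)) (by positivity)
  rw [hlenI, pyRange_eq_map, List.foldl_map] at h2
  simp only [Int.toNat_natCast] at h2
  have hto : ((m : Int) + s - (m : Int)).toNat = (s - 0).toNat := by omega
  rw [hto] at h2
  rw [pyRange_eq_map 0 s, List.foldl_map]
  simp only [zero_add]
  rw [h2, foldl_add_sum]

-- removing k zeros from (replicate k 0 ++ rest) yields rest, for any driving list of length k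
lemma remove_zeros (l : List Int) : ∀ (k : Nat) (rest : List Int), l.length = k →
    l.foldl (fun acc _ => ((PySem.List.remove? acc (0:Int)).getD acc))
      (List.replicate k (0:Int) ++ rest) = rest := by
  induction l with
  | nil => intro k rest h; simp at h; subst h; simp
  | cons x t ih =>
    intro k rest h
    cases k with
    | zero => simp at h
    | succ k' =>
      have hrep : List.replicate (k'+1) (0:Int) ++ rest = 0 :: (List.replicate k' (0:Int) ++ rest) := by
        simp [List.replicate_succ]
      rw [hrep, List.foldl_cons]
      simp only [PySem.List.remove?_cons_self, Option.getD_some]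
      exact ih k' rest (by simpa using h)

-- B's loop only ever appends to the list, so the initial list stays a prefix
lemma foldl_step_prefix (s : Int) (l : List Int) (p : List Int × Int) :
    p.1 <+: (l.foldl (fun (q : List Int × Int) _ =>
      let nxt := 1 + q.2
      let arr := q.1 ++ [nxt]
      (arr, q.2 + nxt - PySem.List.pyGetD arr (-1 - s) 0)) p).1 := by
  induction l generalizing p with
  | nil => exact List.prefix_refl _
  | cons x t ih =>
    rw [List.foldl_cons]
    refine List.IsPrefix.trans ?_ (ih _)
    exact List.prefix_append _ _

-- the joint loop invariant: A's list = B's list, B's window = sum of the last s elements,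
-- and the list has s + m elements after m iterations
lemma main_loop (s : Int) (hs : 0 < s) (m : Nat) :
    (PySem.List.pyRange 0 (m : Int) 1).foldl
      (fun acc i =>
        acc ++ [(PySem.List.pyRange 0 s 1).foldl (fun sum t => sum + PySem.List.pyGetD acc (i+t) 0) 1])
      (List.replicate (s-1).toNat 0 ++ [1])
    = ((PySem.List.pyRange 0 (m : Int) 1).foldl
      (fun (p : List Int × Int) _ =>
        let nxt := 1 + p.2
        let arr := p.1 ++ [nxt]
        (arr, p.2 + nxt - PySem.List.pyGetD arr (-1 - s) 0))
      (List.replicate (s-1).toNat 0 ++ [1], 1)).1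
    ∧ ((PySem.List.pyRange 0 (m : Int) 1).foldl
      (fun (p : List Int × Int) _ =>
        let nxt := 1 + p.2
        let arr := p.1 ++ [nxt]
        (arr, p.2 + nxt - PySem.List.pyGetD arr (-1 - s) 0))
      (List.replicate (s-1).toNat 0 ++ [1], 1)).2
      = (((PySem.List.pyRange 0 (m : Int) 1).foldl
      (fun (p : List Int × Int) _ =>
        let nxt := 1 + p.2
        let arr := p.1 ++ [nxt]
        (arr, p.2 + nxt - PySem.List.pyGetD arr (-1 - s) 0))
      (List.replicate (s-1).toNat 0 ++ [1], 1)).1.drop m).sum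
    ∧ ((PySem.List.pyRange 0 (m : Int) 1).foldl
      (fun (p : List Int × Int) _ =>
        let nxt := 1 + p.2
        let arr := p.1 ++ [nxt]
        (arr, p.2 + nxt - PySem.List.pyGetD arr (-1 - s) 0))
      (List.replicate (s-1).toNat 0 ++ [1], 1)).1.length = s.toNat + m := by
  induction m with
  | zero =>
    have h0 : ((0:Nat):Int) = 0 := rfl
    rw [h0, PySem.List.pyRange_one_eq_nil (le_refl 0)]
    refine ⟨rfl, by simp, by simp; omega⟩
  | succ m ih =>
    obtain ⟨hAB, hw, hlen⟩ := ih
    have hcast : ((m+1 : Nat) : Int) = (m : Int) + 1 := by push_cast; ring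
    rw [hcast, PySem.List.pyRange_one_succ_right (by positivity), List.foldl_append,
        List.foldl_append]
    set FB := (PySem.List.pyRange 0 (m : Int) 1).foldl
      (fun (p : List Int × Int) _ =>
        let nxt := 1 + p.2
        let arr := p.1 ++ [nxt]
        (arr, p.2 + nxt - PySem.List.pyGetD arr (-1 - s) 0))
      (List.replicate (s-1).toNat 0 ++ [1], 1) with hFB
    have hmlt : m < FB.1.length := by omega
    have hnew := inner_sum_eq s hs FB.1 m hlen
    rw [← hw] at hnew
    have hneg : PySem.List.pyGetD (FB.1 ++ [1 + FB.2]) (-1 - s) 0 = FB.1[m] := by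
      have hk : (-1 - s) = -(((s+1).toNat : Nat) : Int) := by omega
      rw [hk, PySem.List.pyGetD_neg_natCast (FB.1 ++ [1 + FB.2]) (s+1).toNat 0 (by omega)
        (by simp; omega)]
      have hidx : (FB.1 ++ [1 + FB.2]).length - (s+1).toNat = m := by simp; omega
      simp only [hidx]
      exact List.getElem_append_left hmlt
    have hdropm : (FB.1.drop m).sum = FB.1[m] + (FB.1.drop (m+1)).sum := by
      rw [List.drop_eq_getElem_cons hmlt, List.sum_cons]
    have hdrop2 : ((FB.1 ++ [1 + FB.2]).drop (m+1)).sum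
        = (FB.1.drop (m+1)).sum + (1 + FB.2) := by
      rw [List.drop_append_of_le_length (by omega), List.sum_append]; simp
    refine ⟨?_, ?_, ?_⟩
    · simp only [List.foldl_cons, List.foldl_nil, hAB, hnew]
    · simp only [List.foldl_cons, List.foldl_nil]
      rw [hneg, hdrop2]
      omega
    · simp only [List.foldl_cons, List.foldl_nil, List.length_append, List.length_cons,
        List.length_nil]
      omega

-- the proof for 0 < s
lemma genweight_pos (n s : Int) (hs : 0 < s) : genweight n s = genweight_alt n s := by
  unfold genweight genweight_alt
  have hzeros : (PySem.List.pyRange 0 (s-1) 1).foldl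
      (fun acc _ => acc ++ [(0:Int)]) [] = List.replicate (s-1).toNat 0 := by
    rw [PySem.List.foldl_append_singleton_eq_map (fun _ => (0:Int)), List.map_const',
        PySem.List.length_pyRange_one, List.nil_append]
    congr 1
    omega
  simp only [hzeros]
  have hrlen : (PySem.List.pyRange 0 (s-1) 1).length = (s-1).toNat := by
    rw [PySem.List.length_pyRange_one]; norm_num
  by_cases hns : 0 < n + s
  · have hm : n + s = (((n+s).toNat : Nat) : Int) := by omega
    rw [hm]
    obtain ⟨hAB, -, -⟩ := main_loop s hs (n+s).toNat
    rw [hAB]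
    obtain ⟨rest, hrest⟩ := foldl_step_prefix s
      (PySem.List.pyRange 0 (((n+s).toNat : Nat) : Int) 1)
      (List.replicate (s-1).toNat 0 ++ [1], 1)
    rw [← hrest, List.append_assoc]
    rw [remove_zeros (PySem.List.pyRange 0 (s-1) 1) (s-1).toNat ([1] ++ rest) hrlen]
    rw [PySem.List.slice_from _ (by omega : (0:Int) ≤ s - 1)]
    rw [List.drop_append_of_le_length (by simp)]
    simp [List.drop_replicate]
  · rw [PySem.List.pyRange_one_eq_nil (a := 0) (b := n+s) (by omega)]
    simp only [List.foldl_nil]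
    rw [remove_zeros (PySem.List.pyRange 0 (s-1) 1) (s-1).toNat [1] hrlen]
    rw [PySem.List.slice_from _ (by omega : (0:Int) ≤ s - 1)]
    rw [List.drop_append_of_le_length (by simp)]
    simp [List.drop_replicate]

-- the degenerate case s ≤ 0 with n + s ≤ 0: both programs return [1]
lemma genweight_degenerate (n s : Int) (hs : s ≤ 0) (hns : n + s ≤ 0) :
    genweight n s = genweight_alt n s := by
  unfold genweight genweight_alt
  rw [PySem.List.pyRange_one_eq_nil (by omega : s - 1 ≤ 0),
      PySem.List.pyRange_one_eq_nil hns]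
  simp only [List.foldl_nil, List.nil_append]
  have hrep : (s-1).toNat = 0 := by omega
  rw [hrep]
  simp only [List.replicate_zero, List.nil_append]
  rw [PySem.List.slice_some_none]
  have hk : s - 1 = -(((1-s).toNat : Nat) : Int) := by omega
  rw [hk, PySem.List.clampIdx_neg_natCast _ _ (by omega)]
  have : (1:Nat) - (1-s).toNat = 0 := by omega
  simp [this]

-- ===== VERDICT (by name: the statement is the Claim_ definition above) =====
theorem genweight_spec : Claim_equal_genweight := by
  intro n s _ hs
  unfold Spec_genweight
  by_cases h1 : 1 ≤ s
  · exact genweight_pos n s (by omega)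
  · exact genweight_degenerate n s (by omega) (by unfold Pre_genweight at hs; omega)
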